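-- pv_equiv track=rewrite | github.com/Sebastian-Monnet/chess | evaluation_2.py | num_central_pawns_in_row
-- ===== SOURCE A (Python) =====
-- def num_central_pawns_in_row(rowstr):
--     i = 0
--     white, black = 0, 0
--     for char in rowstr:
--         if not char.isalpha():
--             i += int(char)
--             continue
--         else:
--             i+=1
--         if char == 'p' and 3 <= i <= 4:
--             black += 1
--         elif char == 'P' and 3 <= i <= 4:
--             white += 1
--     return white, black
-- ===== SOURCE B (Python) =====
-- def num_central_pawns_in_row(rowstr):
--     expanded = ''.join(c if c.isalpha() else '.' * int(c) for c in rowstr)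
--     white = sum(1 for idx in (2, 3) if len(expanded) > idx and expanded[idx] == 'P')
--     black = sum(1 for idx in (2, 3) if len(expanded) > idx and expanded[idx] == 'p')
--     return white, black
-- ===== Notes on version B (the rewrite author's own statement) =====
-- stated objective: simpler
-- what changed: B builds the fully expanded 8-square row string once and reads just the two central positions, replacing A's position-tracking counting loop with fixed-index lookups.
import Mathlib
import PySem

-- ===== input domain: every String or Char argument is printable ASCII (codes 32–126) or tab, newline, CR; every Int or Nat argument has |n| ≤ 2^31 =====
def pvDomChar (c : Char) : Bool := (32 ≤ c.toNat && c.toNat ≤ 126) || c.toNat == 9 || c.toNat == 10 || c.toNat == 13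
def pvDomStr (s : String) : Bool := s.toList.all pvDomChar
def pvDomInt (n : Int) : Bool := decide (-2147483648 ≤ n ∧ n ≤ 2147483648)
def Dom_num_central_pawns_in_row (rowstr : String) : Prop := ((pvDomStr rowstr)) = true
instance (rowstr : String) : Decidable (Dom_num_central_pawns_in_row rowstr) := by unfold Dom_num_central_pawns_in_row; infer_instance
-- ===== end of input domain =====

set_option maxRecDepth 4000


-- B builds the fully expanded row once and reads only its two central squares, instead of
-- A's position-tracking counting loop; objective: simpler (same return value everywhere A returns).

-- ===== PORT A =====
-- A's loop over the characters with running state (i, white, black)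
def pvAStep (st : Int × Int × Int) (c : Char) : Int × Int × Int :=
  let (i, white, black) := st
  if ¬ PySem.Chars.isalpha c then
    -- i += int(char); Pre_ guarantees c is a digit so int(char) returns (getD 0 is unreachable)
    (i + (PySem.Int.ofStr? (String.mk [c])).getD 0, white, black)
  else
    let i' := i + 1
    if c = 'p' ∧ 3 ≤ i' ∧ i' ≤ 4 then (i', white, black + 1)
    else if c = 'P' ∧ 3 ≤ i' ∧ i' ≤ 4 then (i', white + 1, black)
    else (i', white, black)

def num_central_pawns_in_row (rowstr : String) : Int × Int :=
  let st := rowstr.toList.foldl pvAStep (0, 0, 0)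
  (st.2.1, st.2.2)

-- ===== PORT B =====
-- the expanded row: letters kept, a digit d contributes d dots
def pvExpand (l : List Char) : List Char :=
  l.flatMap (fun c =>
    if PySem.Chars.isalpha c then [c]
    else List.replicate ((PySem.Int.ofStr? (String.mk [c])).getD 0).toNat '.')

-- sum over idx ∈ (2, 3) of (len(expanded) > idx and expanded[idx] == t)
def pvCentral (expanded : List Char) (t : Char) : Int :=
  ([2, 3] : List Nat).foldl
    (fun acc idx => acc + (if expanded.length > idx ∧ expanded[idx]? = some t then 1 else 0)) 0

def num_central_pawns_in_row_alt (rowstr : String) : Int × Int :=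
  let expanded := pvExpand rowstr.toList
  (pvCentral expanded 'P', pvCentral expanded 'p')

-- ===== PRECONDITION & SPEC =====
-- Pre_ excludes exactly the inputs on which A raises ValueError: any character that is
-- neither a letter nor a decimal digit makes A's int(char) raise (B raises there too).
def Pre_num_central_pawns_in_row (rowstr : String) : Prop :=
  rowstr.toList.all (fun c => PySem.Chars.isalpha c || PySem.Chars.isdigit c) = true
instance (rowstr : String) : Decidable (Pre_num_central_pawns_in_row rowstr) := by
  unfold Pre_num_central_pawns_in_row; infer_instance

def pvWitness_num_central_pawns_in_row : String := "2pP4"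

def Spec_num_central_pawns_in_row (rowstr : String) (out : Int × Int) : Prop := out = num_central_pawns_in_row_alt rowstr
instance (rowstr : String) (out : Int × Int) : Decidable (Spec_num_central_pawns_in_row rowstr out) := by unfold Spec_num_central_pawns_in_row; infer_instance

-- ===== CLAIM (what is proved, stated in full; the proofs are below) =====
def Claim_equal_num_central_pawns_in_row : Prop := ∀ (rowstr : String), Dom_num_central_pawns_in_row rowstr → Pre_num_central_pawns_in_row rowstr → Spec_num_central_pawns_in_row rowstr (num_central_pawns_in_row rowstr)

-- ===== LEMMAS AND PROOFS =====

theorem pv_char_eq_of_toNat (c d : Char) (h : c.toNat = d.toNat) : c = d := by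
  apply Char.ext
  exact UInt32.toNat_inj.mp h

-- int(c) for a decimal digit character c is its digit value
theorem pv_digit_val (c : Char) (hd : PySem.Chars.isdigit c = true) :
    (PySem.Int.ofStr? (String.mk [c])).getD 0 = ((c.toNat - 48 : Nat) : Int) := by
  have h : 48 ≤ c.toNat ∧ c.toNat ≤ 57 := by
    simp only [PySem.Chars.isdigit, Bool.and_eq_true, decide_eq_true_eq, Char.le_def,
      UInt32.le_iff_toNat_le] at hd
    exact hd
  have h10 : c.toNat = 48 ∨ c.toNat = 49 ∨ c.toNat = 50 ∨ c.toNat = 51 ∨ c.toNat = 52 ∨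
      c.toNat = 53 ∨ c.toNat = 54 ∨ c.toNat = 55 ∨ c.toNat = 56 ∨ c.toNat = 57 := by omega
  rcases h10 with h|h|h|h|h|h|h|h|h|h
  · rw [pv_char_eq_of_toNat c '0' (by rw [h]; decide)]; decide
  · rw [pv_char_eq_of_toNat c '1' (by rw [h]; decide)]; decide
  · rw [pv_char_eq_of_toNat c '2' (by rw [h]; decide)]; decide
  · rw [pv_char_eq_of_toNat c '3' (by rw [h]; decide)]; decide
  · rw [pv_char_eq_of_toNat c '4' (by rw [h]; decide)]; decide
  · rw [pv_char_eq_of_toNat c '5' (by rw [h]; decide)]; decide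
  · rw [pv_char_eq_of_toNat c '6' (by rw [h]; decide)]; decide
  · rw [pv_char_eq_of_toNat c '7' (by rw [h]; decide)]; decide
  · rw [pv_char_eq_of_toNat c '8' (by rw [h]; decide)]; decide
  · rw [pv_char_eq_of_toNat c '9' (by rw [h]; decide)]; decide

-- occurrences of t among absolute positions 2 and 3, the list starting at absolute position n
def pvCnt (t : Char) (n : Nat) (l : List Char) : Int :=
  match l with
  | [] => 0
  | c :: l' => (if (n = 2 ∨ n = 3) ∧ c = t then 1 else 0) + pvCnt t (n + 1) l'

theorem pvCnt_ge4 (t : Char) (n : Nat) (l : List Char) (h : 4 ≤ n) : pvCnt t n l = 0 := by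
  induction l generalizing n with
  | nil => rfl
  | cons c l' ih =>
    have hno : ¬ ((n = 2 ∨ n = 3) ∧ c = t) := by rintro ⟨h2 | h3, _⟩ <;> omega
    simp [pvCnt, ih (n + 1) (by omega), hno]

theorem pvCnt_replicate (t : Char) (v : Nat) (n : Nat) (l : List Char) (ht : t ≠ '.') :
    pvCnt t n (List.replicate v '.' ++ l) = pvCnt t (n + v) l := by
  induction v generalizing n with
  | zero => simp
  | succ v ih =>
    have hno : ¬ ((n = 2 ∨ n = 3) ∧ '.' = t) := by rintro ⟨_, h⟩; exact ht h.symm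
    simp only [List.replicate_succ, List.cons_append, pvCnt, ih (n + 1), hno, if_false]
    have : n + 1 + v = n + (v + 1) := by omega
    rw [this]
    ring

-- A's loop computes the counts of 'P' and 'p' at absolute positions 2 and 3 of the expansion
theorem pvA_loop (l : List Char) (n : Nat) (w b : Int)
    (hl : l.all (fun c => PySem.Chars.isalpha c || PySem.Chars.isdigit c) = true) :
    l.foldl pvAStep ((n : Int), w, b)
      = ((n : Int) + (pvExpand l).length,
         w + pvCnt 'P' n (pvExpand l), b + pvCnt 'p' n (pvExpand l)) := by
  induction l generalizing n w b with
  | nil => simp [pvExpand, pvCnt]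
  | cons c l' ih =>
    simp only [List.all_cons, Bool.and_eq_true, Bool.or_eq_true] at hl
    obtain ⟨hc, hl'⟩ := hl
    rw [List.foldl_cons]
    by_cases ha : PySem.Chars.isalpha c = true
    · have hexp : pvExpand (c :: l') = c :: pvExpand l' := by simp [pvExpand, ha]
      have hcast : ((n : Int) + 1) = ((n + 1 : Nat) : Int) := by push_cast; ring
      have hiff : ((3 : Int) ≤ (n : Int) + 1 ∧ (n : Int) + 1 ≤ 4) ↔ (n = 2 ∨ n = 3) := by
        omega
      by_cases hp : c = 'p'
      · subst hp
        by_cases hn : (n = 2 ∨ n = 3)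
        · have hstep : pvAStep ((n : Int), w, b) 'p' = ((n : Int) + 1, w, b + 1) := by
            simp only [pvAStep]
            rw [if_neg (not_not_intro ha), if_pos (by exact ⟨by trivial, hiff.mpr hn⟩)]
          rw [hstep, hcast, ih (n + 1) _ _ hl', hexp]
          simp only [pvCnt, List.length_cons, Prod.mk.injEq]
          rw [if_neg (fun h => absurd h.2 (by decide)), if_pos (by exact ⟨hn, by trivial⟩)]
          refine ⟨by push_cast; ring, by ring, by ring⟩
        · have hno : ¬ ((3 : Int) ≤ (n : Int) + 1 ∧ (n : Int) + 1 ≤ 4) := fun h => hn (hiff.mp h)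
          have hstep : pvAStep ((n : Int), w, b) 'p' = ((n : Int) + 1, w, b) := by
            simp only [pvAStep]
            rw [if_neg (not_not_intro ha), if_neg (fun h => hno h.2),
                if_neg (fun (h : 'p' = 'P' ∧ _) => absurd h.1 (by decide))]
          rw [hstep, hcast, ih (n + 1) _ _ hl', hexp]
          simp only [pvCnt, List.length_cons, Prod.mk.injEq]
          rw [if_neg (fun h => absurd h.2 (by decide)), if_neg (fun h => hn h.1)]
          refine ⟨by push_cast; ring, by ring, by ring⟩
      · by_cases hP : c = 'P'
        · subst hP
          by_cases hn : (n = 2 ∨ n = 3)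
          · have hstep : pvAStep ((n : Int), w, b) 'P' = ((n : Int) + 1, w + 1, b) := by
              simp only [pvAStep]
              rw [if_neg (not_not_intro ha),
                  if_neg (fun (h : 'P' = 'p' ∧ _) => absurd h.1 (by decide)),
                  if_pos (by exact ⟨by trivial, hiff.mpr hn⟩)]
            rw [hstep, hcast, ih (n + 1) _ _ hl', hexp]
            simp only [pvCnt, List.length_cons, Prod.mk.injEq]
            rw [if_pos (by exact ⟨hn, by trivial⟩), if_neg (fun h => absurd h.2 (by decide))]
            refine ⟨by push_cast; ring, by ring, by ring⟩
          · have hno : ¬ ((3 : Int) ≤ (n : Int) + 1 ∧ (n : Int) + 1 ≤ 4) := fun h => hn (hiff.mp h)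
            have hstep : pvAStep ((n : Int), w, b) 'P' = ((n : Int) + 1, w, b) := by
              simp only [pvAStep]
              rw [if_neg (not_not_intro ha),
                  if_neg (fun (h : 'P' = 'p' ∧ _) => absurd h.1 (by decide)),
                  if_neg (fun h => hno h.2)]
            rw [hstep, hcast, ih (n + 1) _ _ hl', hexp]
            simp only [pvCnt, List.length_cons, Prod.mk.injEq]
            rw [if_neg (fun h => hn h.1), if_neg (fun h => absurd h.2 (by decide))]
            refine ⟨by push_cast; ring, by ring, by ring⟩
        · have hstep : pvAStep ((n : Int), w, b) c = ((n : Int) + 1, w, b) := by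
            simp only [pvAStep]
            rw [if_neg (not_not_intro ha), if_neg (fun h => hp h.1), if_neg (fun h => hP h.1)]
          rw [hstep, hcast, ih (n + 1) _ _ hl', hexp]
          simp only [pvCnt, List.length_cons, Prod.mk.injEq]
          rw [if_neg (fun h => hP h.2), if_neg (fun h => hp h.2)]
          refine ⟨by push_cast; ring, by ring, by ring⟩
    · have hd : PySem.Chars.isdigit c = true := by
        rcases hc with h | h
        · exact absurd h ha
        · exact h
      have hval := pv_digit_val c hd
      set v : Nat := c.toNat - 48 with hv
      have hexp : pvExpand (c :: l') = List.replicate v '.' ++ pvExpand l' := by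
        simp [pvExpand, ha, hval]
      have hstep : pvAStep ((n : Int), w, b) c = (((n + v : Nat) : Int), w, b) := by
        simp only [pvAStep]
        rw [if_pos ha, hval]
        simp only [Prod.mk.injEq]
        exact ⟨by push_cast; ring, by simp⟩
      rw [hstep, ih (n + v) _ _ hl', hexp]
      simp only [pvCnt_replicate 'P' v n _ (by decide), pvCnt_replicate 'p' v n _ (by decide),
        List.length_append, List.length_replicate, Prod.mk.injEq]
      exact ⟨by push_cast; ring, by simp⟩

-- pvCnt from position 0 is exactly B's two central lookups
theorem pvCnt_zero (t : Char) (l : List Char) : pvCnt t 0 l = pvCentral l t := by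
  match l with
  | [] => simp [pvCnt, pvCentral]
  | [a] => simp [pvCnt, pvCentral]
  | [a, b] => simp [pvCnt, pvCentral]
  | [a, b, c] =>
    by_cases h : c = t <;> simp [pvCnt, pvCentral, h]
  | a :: b :: c :: d :: rest =>
    have h4 := pvCnt_ge4 t 4 rest (le_refl _)
    by_cases hc : c = t <;> by_cases hdt : d = t <;>
      simp [pvCnt, pvCentral, hc, hdt, h4]

-- ===== VERDICT (by name: the statement is the Claim_ definition above) =====
theorem num_central_pawns_in_row_spec : Claim_equal_num_central_pawns_in_row := by
  intro rowstr _hdom hpre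
  unfold Spec_num_central_pawns_in_row num_central_pawns_in_row num_central_pawns_in_row_alt
  have h := pvA_loop rowstr.toList 0 0 0 hpre
  simp only [Nat.cast_zero] at h
  rw [h]
  simp [pvCnt_zero]
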